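-- pv_equiv track=rewrite | github.com/lucas-isenmann/fragments-assembly | module/solver1.py | build_modified_matrix
-- ===== SOURCE A (Python) =====
-- def build_modified_matrix(f, t=20):
--     """
--     Builds f' from f such that f'[i][j] = f'[j][i] = 1 if f[i][j] >= t or f[j][i] >= t,
--     otherwise f'[i][j] = f'[j][i] = 0.
--     """
--     n = len(f)  # Assuming f is a square matrix
--     f_prime = [[0] * n for _ in range(n)]
--
--     for i in range(n):
--         for j in range(i, n):  # Loop through upper triangular matrix
--             if f[i][j] >= t or f[j][i] >= t:
--                 f_prime[i][j] = 1
--                 f_prime[j][i] = 1  # Ensure symmetry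
--
--     return f_prime
-- ===== SOURCE B (Python) =====
-- def build_modified_matrix(f, t=20):
--     n = len(f)
--     g = [[1 if f[i][j] >= t else 0 for j in range(n)] for i in range(n)]
--     gt = [[g[j][i] for j in range(n)] for i in range(n)]
--     return [[max(a, b) for a, b in zip(row, trow)] for row, trow in zip(g, gt)]
-- ===== Notes on version B (the rewrite author's own statement) =====
-- stated objective: alternative
-- what changed: Replaces A's in-place upper-triangle loop with mirrored writes by three staged passes: threshold f one-sidedly into g, build the transpose gt, and combine g and gt cellwise with max; no cell ever evaluates the two-sided condition.
import Mathlib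
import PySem

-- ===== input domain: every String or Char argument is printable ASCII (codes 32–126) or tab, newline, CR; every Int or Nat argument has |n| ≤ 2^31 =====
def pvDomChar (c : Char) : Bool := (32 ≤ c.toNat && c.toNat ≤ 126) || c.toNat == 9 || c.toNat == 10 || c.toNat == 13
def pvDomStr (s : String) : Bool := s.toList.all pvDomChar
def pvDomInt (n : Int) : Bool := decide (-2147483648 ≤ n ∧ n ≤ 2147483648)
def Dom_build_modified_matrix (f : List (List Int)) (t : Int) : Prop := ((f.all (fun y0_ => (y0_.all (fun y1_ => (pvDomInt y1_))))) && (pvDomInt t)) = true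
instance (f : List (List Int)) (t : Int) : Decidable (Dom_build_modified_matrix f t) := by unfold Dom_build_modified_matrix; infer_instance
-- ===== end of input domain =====

-- B replaces A's in-place upper-triangle loop with mirrored writes by three staged passes:
-- one-sided threshold matrix g, its transpose gt, then a cellwise max of g and gt (objective: alternative).

-- ===== PORT A =====
-- f_prime[i][j] = v for in-range nonnegative i, j (exact under Pre_)
def pyAssign (m : List (List Int)) (i j v : Int) : List (List Int) :=
  PySem.List.pySetD m i (PySem.List.pySetD (PySem.List.pyGetD m i []) j v)

def build_modified_matrix (f : List (List Int)) (t : Int) : List (List Int) :=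
  let n : Int := (f.length : Int)
  -- [[0] * n for _ in range(n)]; [0]*n = List.replicate n.toNat 0 (exact, n ≥ 0)
  let f_prime : List (List Int) :=
    (PySem.List.pyRange 0 n 1).map (fun _ => List.replicate n.toNat (0 : Int))
  (PySem.List.pyRange 0 n 1).foldl (fun m i =>
    (PySem.List.pyRange i n 1).foldl (fun m j =>
      if PySem.List.pyGetD (PySem.List.pyGetD f i []) j 0 ≥ t ∨
         PySem.List.pyGetD (PySem.List.pyGetD f j []) i 0 ≥ t then
        pyAssign (pyAssign m i j 1) j i 1
      else m) m) f_prime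

-- ===== PORT B =====
def build_modified_matrix_alt (f : List (List Int)) (t : Int) : List (List Int) :=
  let n : Int := (f.length : Int)
  let g : List (List Int) :=
    (PySem.List.pyRange 0 n 1).map (fun i =>
      (PySem.List.pyRange 0 n 1).map (fun j =>
        if PySem.List.pyGetD (PySem.List.pyGetD f i []) j 0 ≥ t then (1 : Int) else 0))
  let gt : List (List Int) :=
    (PySem.List.pyRange 0 n 1).map (fun i =>
      (PySem.List.pyRange 0 n 1).map (fun j =>
        PySem.List.pyGetD (PySem.List.pyGetD g j []) i 0))
  -- zip truncates to the shorter list = List.zipWith (exact)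
  List.zipWith (fun row trow => List.zipWith (fun a b => max a b) row trow) g gt

-- ===== PRECONDITION & SPEC =====
-- Pre_ excludes exactly the inputs where the Python A raises IndexError: some row shorter
-- than len(f) (A unconditionally reads f[i][j] for every j in i..n-1 in row i).
def Pre_build_modified_matrix (f : List (List Int)) (t : Int) : Prop :=
  ∀ r ∈ f, f.length ≤ r.length
instance (f : List (List Int)) (t : Int) : Decidable (Pre_build_modified_matrix f t) := by
  unfold Pre_build_modified_matrix; infer_instance

def pvWitness_build_modified_matrix : List (List Int) × Int := ([[5, 30], [0, 1]], 20)

def Spec_build_modified_matrix (f : List (List Int)) (t : Int) (out : List (List Int)) : Prop := out = build_modified_matrix_alt f t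
instance (f : List (List Int)) (t : Int) (out : List (List Int)) : Decidable (Spec_build_modified_matrix f t out) := by unfold Spec_build_modified_matrix; infer_instance

-- ===== CLAIM (what is proved, stated in full; the proofs are below) =====
def Claim_equal_build_modified_matrix : Prop := ∀ (f : List (List Int)) (t : Int), Dom_build_modified_matrix f t → Pre_build_modified_matrix f t → Spec_build_modified_matrix f t (build_modified_matrix f t)

-- ===== LEMMAS AND PROOFS =====

-- Nat-level value of one output cell
def cellv (f : List (List Int)) (t : Int) (i j : Nat) : Int :=
  if (f.getD i []).getD j 0 ≥ t ∨ (f.getD j []).getD i 0 ≥ t then 1 else 0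

-- one-sided threshold cell
def thrv (f : List (List Int)) (t : Int) (i j : Nat) : Int :=
  if (f.getD i []).getD j 0 ≥ t then 1 else 0

-- matrix given by a cell function
def mat (n : Nat) (g : Nat → Nat → Int) : List (List Int) :=
  (List.range n).map (fun i => (List.range n).map (fun j => g i j))

-- Nat-level single assignment m[i][j] := 1
def setc (m : List (List Int)) (i j : Nat) : List (List Int) :=
  m.set i ((m.getD i []).set j 1)

-- Nat-level inner-loop body
def stepN (f : List (List Int)) (t : Int) (i : Nat) (m : List (List Int)) (j : Nat) : List (List Int) :=
  if (f.getD i []).getD j 0 ≥ t ∨ (f.getD j []).getD i 0 ≥ t then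
    setc (setc m i j) j i
  else m

lemma mat_congr {n : Nat} {g g' : Nat → Nat → Int}
    (h : ∀ a b, a < n → b < n → g a b = g' a b) : mat n g = mat n g' := by
  simp only [mat]
  refine List.map_congr_left (fun a ha => ?_)
  rw [List.mem_range] at ha
  refine List.map_congr_left (fun b hb => ?_)
  rw [List.mem_range] at hb
  exact h a b ha hb

lemma set_map_range {β : Type} (n j : Nat) (h : Nat → β) (v : β) :
    ((List.range n).map h).set j v = (List.range n).map (fun k => if k = j then v else h k) := by
  apply List.ext_getElem
  · simp
  · intro idx h1 h2
    simp only [List.getElem_set, List.getElem_map, List.getElem_range]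
    rcases eq_or_ne idx j with rfl | hne
    · simp
    · simp [hne, Ne.symm hne]

lemma setc_mat {n : Nat} (g : Nat → Nat → Int) {i : Nat} (j : Nat) (hi : i < n) :
    setc (mat n g) i j = mat n (fun a b => if a = i ∧ b = j then 1 else g a b) := by
  have hrow : (mat n g).getD i [] = (List.range n).map (fun b => g i b) := by
    rw [List.getD_eq_getElem?_getD]
    simp [mat, hi]
  unfold setc
  rw [hrow, set_map_range]
  show ((List.range n).map (fun a => (List.range n).map (fun b => g a b))).set i _ = _
  rw [set_map_range]
  refine List.map_congr_left (fun a ha => ?_)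
  rcases eq_or_ne a i with rfl | hne
  · simp
  · simp [hne]

lemma cellv_one {f : List (List Int)} {t : Int} {i j : Nat}
    (h : (f.getD i []).getD j 0 ≥ t ∨ (f.getD j []).getD i 0 ≥ t) :
    cellv f t i j = 1 := if_pos h

lemma cellv_zero {f : List (List Int)} {t : Int} {i j : Nat}
    (h : ¬ ((f.getD i []).getD j 0 ≥ t ∨ (f.getD j []).getD i 0 ≥ t)) :
    cellv f t i j = 0 := if_neg h

lemma inner_fold (f : List (List Int)) (t : Int) {n : Nat} {i : Nat} (hi : i < n) :
    ∀ (len l : Nat) (g : Nat → Nat → Int), l + len ≤ n →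
      (∀ b, l ≤ b → b < n → g i b = 0 ∧ g b i = 0) →
      (List.range len).foldl (fun m k => stepN f t i m (l + k)) (mat n g) =
        mat n (fun a b =>
          if (a = i ∧ l ≤ b ∧ b < l + len) ∨ (b = i ∧ l ≤ a ∧ a < l + len)
          then cellv f t a b else g a b) := by
  intro len
  induction len with
  | zero =>
    intro l g _ _
    simp only [List.range_zero, List.foldl_nil]
    exact mat_congr (fun p q hp hq => by rw [if_neg (by omega)])
  | succ len ih =>
    intro l g hlen Hg
    have hl : l < n := by omega
    rw [List.range_succ_eq_map, List.foldl_cons, List.foldl_map]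
    have hstep : stepN f t i (mat n g) (l + 0) =
        mat n (fun p q => if (p = i ∧ q = l) ∨ (p = l ∧ q = i) then cellv f t p q else g p q) := by
      simp only [Nat.add_zero, stepN]
      split_ifs with hc
      · rw [setc_mat g l hi, setc_mat _ i hl]
        refine mat_congr (fun p q hp hq => ?_)
        by_cases hd : (p = i ∧ q = l) ∨ (p = l ∧ q = i)
        · rw [if_pos hd]
          rcases hd with ⟨hp1, hq1⟩ | ⟨hp1, hq1⟩
          · rw [hp1, hq1, cellv_one hc]
            split_ifs with h1 h2
            · rfl
            · rfl
            · exact absurd ⟨rfl, rfl⟩ h2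
          · rw [hp1, hq1, if_pos ⟨rfl, rfl⟩, cellv_one hc.symm]
        · rw [if_neg hd, if_neg (by tauto), if_neg (by tauto)]
      · refine mat_congr (fun p q hp hq => ?_)
        by_cases hd : (p = i ∧ q = l) ∨ (p = l ∧ q = i)
        · rw [if_pos hd]
          rcases hd with ⟨hp1, hq1⟩ | ⟨hp1, hq1⟩
          · rw [hp1, hq1, cellv_zero hc, (Hg l le_rfl hl).1]
          · rw [hp1, hq1, cellv_zero (fun h => hc h.symm), (Hg l le_rfl hl).2]
        · rw [if_neg hd]
    have heq : (fun (m : List (List Int)) (k : Nat) => stepN f t i m (l + Nat.succ k)) =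
        (fun (m : List (List Int)) (k : Nat) => stepN f t i m ((l + 1) + k)) := by
      funext m k; congr 1; omega
    rw [heq, hstep, ih (l + 1)
        (fun p q => if (p = i ∧ q = l) ∨ (p = l ∧ q = i) then cellv f t p q else g p q)
        (by omega)
        (by
          intro b hb1 hb2
          constructor
          · beta_reduce; rw [if_neg (by omega)]; exact (Hg b (by omega) hb2).1
          · beta_reduce; rw [if_neg (by omega)]; exact (Hg b (by omega) hb2).2)]
    refine mat_congr (fun p q hp hq => ?_)
    by_cases hbig : (p = i ∧ l ≤ q ∧ q < l + (len + 1)) ∨ (q = i ∧ l ≤ p ∧ p < l + (len + 1))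
    · rw [if_pos hbig]
      by_cases hih : (p = i ∧ l + 1 ≤ q ∧ q < l + 1 + len) ∨ (q = i ∧ l + 1 ≤ p ∧ p < l + 1 + len)
      · rw [if_pos hih]
      · rw [if_neg hih]
        have hd : (p = i ∧ q = l) ∨ (p = l ∧ q = i) := by
          rcases hbig with ⟨rfl, h⟩ | ⟨rfl, h⟩
          · left; exact ⟨rfl, by omega⟩
          · right; exact ⟨by omega, rfl⟩
        rw [if_pos hd]
    · rw [if_neg hbig, if_neg (by omega),
        if_neg (by rintro (⟨rfl, h⟩ | ⟨rfl, h⟩) <;> exact hbig (by omega))]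

lemma outer_fold (f : List (List Int)) (t : Int) (n : Nat) :
    ∀ (c i0 : Nat) (g : Nat → Nat → Int), i0 + c = n →
      (∀ a b, a < n → b < n → i0 ≤ a → i0 ≤ b → g a b = 0) →
      (List.range c).foldl
        (fun m k => (List.range (n - (i0 + k))).foldl
          (fun m kk => stepN f t (i0 + k) m ((i0 + k) + kk)) m) (mat n g) =
        mat n (fun a b => if i0 ≤ a ∧ i0 ≤ b ∧ a < n ∧ b < n then cellv f t a b else g a b) := by
  intro c
  induction c with
  | zero =>
    intro i0 g hc Hg
    simp only [List.range_zero, List.foldl_nil]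
    exact mat_congr (fun a b ha hb => by rw [if_neg (by omega)])
  | succ c ih =>
    intro i0 g hc Hg
    have hi0 : i0 < n := by omega
    rw [List.range_succ_eq_map, List.foldl_cons, List.foldl_map]
    have h1 : (List.range (n - (i0 + 0))).foldl
        (fun m kk => stepN f t (i0 + 0) m ((i0 + 0) + kk)) (mat n g) =
        mat n (fun a b =>
          if (a = i0 ∧ i0 ≤ b ∧ b < i0 + (n - i0)) ∨ (b = i0 ∧ i0 ≤ a ∧ a < i0 + (n - i0))
          then cellv f t a b else g a b) := by
      simp only [Nat.add_zero]
      exact inner_fold f t hi0 (n - i0) i0 g (by omega)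
        (fun b hb1 hb2 => ⟨Hg i0 b hi0 hb2 le_rfl hb1, Hg b i0 hb2 hi0 hb1 le_rfl⟩)
    have heq2 : (fun (m : List (List Int)) (k : Nat) =>
        (List.range (n - (i0 + Nat.succ k))).foldl
          (fun m kk => stepN f t (i0 + Nat.succ k) m ((i0 + Nat.succ k) + kk)) m) =
        (fun (m : List (List Int)) (k : Nat) =>
        (List.range (n - ((i0 + 1) + k))).foldl
          (fun m kk => stepN f t ((i0 + 1) + k) m (((i0 + 1) + k) + kk)) m) := by
      funext m k
      have h : i0 + Nat.succ k = (i0 + 1) + k := by omega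
      rw [h]
    rw [heq2, h1, ih (i0 + 1) _ (by omega)
      (by
        intro a b ha hb ha1 hb1
        rw [if_neg (by omega)]
        exact Hg a b ha hb (by omega) (by omega))]
    refine mat_congr (fun a b ha hb => ?_)
    by_cases hbig : i0 ≤ a ∧ i0 ≤ b ∧ a < n ∧ b < n
    · rw [if_pos hbig]
      by_cases hih : i0 + 1 ≤ a ∧ i0 + 1 ≤ b ∧ a < n ∧ b < n
      · rw [if_pos hih]
      · rw [if_neg hih, if_pos (by omega)]
    · rw [if_neg hbig, if_neg (by omega), if_neg (by omega)]

-- ===== normalization of the ports to Nat level =====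

-- B's port equals the cellwise matrix of cellv
lemma altN (f : List (List Int)) (t : Int) :
    build_modified_matrix_alt f t = mat f.length (cellv f t) := by
  have hc : ∀ a b : Nat, max (thrv f t a b) (thrv f t b a) = cellv f t a b := by
    intro a b; simp only [thrv, cellv]; split_ifs <;> simp_all <;> omega
  simp only [build_modified_matrix_alt, mat, PySem.List.pyRange_one, Int.sub_zero,
    Int.toNat_natCast, List.map_map, Function.comp_def, Int.mul_one, Int.zero_add]
  apply List.ext_getElem
  · simp
  · intro i h1 h2
    simp only [List.length_zipWith, List.length_map, List.length_range, Nat.min_self,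
      List.length_map] at h1 h2 ⊢
    simp only [List.getElem_zipWith, List.getElem_map, List.getElem_range]
    apply List.ext_getElem
    · simp
    · intro j g1 g2
      simp only [List.length_zipWith, List.length_map, List.length_range, Nat.min_self] at g1 g2 ⊢
      simp only [List.getElem_zipWith, List.getElem_map, List.getElem_range,
        PySem.List.pyGetD_natCast]
      rw [← hc]
      congr 1
      all_goals
        simp [thrv, List.getD_eq_getElem?_getD, List.getElem?_range, g2, h2]

lemma pyAssign_natCast (m : List (List Int)) (i j : Nat) :
    pyAssign m (i : Int) (j : Int) 1 = setc m i j := by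
  simp [pyAssign, setc, List.getD_eq_getElem?_getD]

lemma portA_eq (f : List (List Int)) (t : Int) :
    build_modified_matrix f t =
      (List.range f.length).foldl
        (fun m i => (List.range (f.length - i)).foldl
          (fun m k => stepN f t i m (i + k)) m)
        (mat f.length (fun _ _ => 0)) := by
  simp only [build_modified_matrix]
  have hinit : (PySem.List.pyRange 0 (f.length : Int) 1).map
      (fun _ => List.replicate ((f.length : Int)).toNat (0 : Int)) =
      mat f.length (fun _ _ => 0) := by
    simp [mat, PySem.List.pyRange_one, List.map_map, Function.comp_def, List.map_const']
  rw [hinit, PySem.List.pyRange_one]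
  simp only [Int.sub_zero, Int.toNat_natCast, List.foldl_map]
  have houter : (fun (m : List (List Int)) (i : Nat) =>
      (PySem.List.pyRange ((0 : Int) + (i : Int)) (f.length : Int) 1).foldl
        (fun m j =>
          if PySem.List.pyGetD (PySem.List.pyGetD f ((0 : Int) + (i : Int)) []) j 0 ≥ t ∨
             PySem.List.pyGetD (PySem.List.pyGetD f j []) ((0 : Int) + (i : Int)) 0 ≥ t then
            pyAssign (pyAssign m ((0 : Int) + (i : Int)) j 1) j ((0 : Int) + (i : Int)) 1
          else m) m) =
      (fun (m : List (List Int)) (i : Nat) =>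
        (List.range (f.length - i)).foldl (fun m k => stepN f t i m (i + k)) m) := by
    funext m i
    rw [PySem.List.pyRange_one]
    have hlen : (((f.length : Int)) - ((0 : Int) + (i : Int))).toNat = f.length - i := by omega
    rw [hlen, List.foldl_map]
    have hinner : (fun (m' : List (List Int)) (k : Nat) =>
        (fun (j : Int) =>
          if PySem.List.pyGetD (PySem.List.pyGetD f ((0 : Int) + (i : Int)) []) j 0 ≥ t ∨
             PySem.List.pyGetD (PySem.List.pyGetD f j []) ((0 : Int) + (i : Int)) 0 ≥ t then
            pyAssign (pyAssign m' ((0 : Int) + (i : Int)) j 1) j ((0 : Int) + (i : Int)) 1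
          else m') ((0 : Int) + (i : Int) + (k : Int))) =
        (fun (m' : List (List Int)) (k : Nat) => stepN f t i m' (i + k)) := by
      funext m' k
      beta_reduce
      have hcast : (0 : Int) + (i : Int) + (k : Int) = ((i + k : Nat) : Int) := by push_cast; ring
      have h0i : (0 : Int) + (i : Int) = ((i : Nat) : Int) := by ring
      rw [hcast, h0i]
      simp only [stepN, PySem.List.pyGetD_natCast, pyAssign_natCast]
    rw [hinner]
  rw [houter]

-- ===== VERDICT (by name: the statement is the Claim_ definition above) =====
theorem build_modified_matrix_spec : Claim_equal_build_modified_matrix := by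
  intro f t _ _
  unfold Spec_build_modified_matrix
  have hout := outer_fold f t f.length f.length 0 (fun _ _ => 0) (by omega)
    (fun _ _ _ _ _ _ => rfl)
  simp only [Nat.zero_add] at hout
  rw [portA_eq, altN, hout]
  exact mat_congr (fun a b ha hb => by rw [if_pos (by omega)])
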